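-- pv_equiv track=rewrite | github.com/kohanyirobert/advent-of-code-2016 | 06/main.py | reverse_frequency_map
-- ===== SOURCE A (Python) =====
-- def reverse_frequency_map(frequency_map):
--     result = {}
--     for k, v in frequency_map.items():
--         if v not in result:
--             result[v] = []
--         result[v].append(k)
--         result[v].sort()
--     return result
-- ===== SOURCE B (Python) =====
-- def reverse_frequency_map(frequency_map):
--     # pre-create buckets in first-occurrence order of the values, then sort all
--     # items once globally by key and distribute; every bucket comes out sorted
--     # without ever sorting a bucket itself.
--     result = {v: [] for v in frequency_map.values()}
--     for k, v in sorted(frequency_map.items(), key=lambda kv: kv[0]):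
--         result[v].append(k)
--     return result
-- ===== Notes on version B (the rewrite author's own statement) =====
-- stated objective: faster
-- what changed: B never sorts a bucket: it pre-creates all buckets in first-occurrence order of the values, sorts the whole item list once globally by key, and distributes keys into their buckets in a single pass, so each bucket is sorted by construction, instead of A's re-sort of the growing bucket after every append.
import Mathlib
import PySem

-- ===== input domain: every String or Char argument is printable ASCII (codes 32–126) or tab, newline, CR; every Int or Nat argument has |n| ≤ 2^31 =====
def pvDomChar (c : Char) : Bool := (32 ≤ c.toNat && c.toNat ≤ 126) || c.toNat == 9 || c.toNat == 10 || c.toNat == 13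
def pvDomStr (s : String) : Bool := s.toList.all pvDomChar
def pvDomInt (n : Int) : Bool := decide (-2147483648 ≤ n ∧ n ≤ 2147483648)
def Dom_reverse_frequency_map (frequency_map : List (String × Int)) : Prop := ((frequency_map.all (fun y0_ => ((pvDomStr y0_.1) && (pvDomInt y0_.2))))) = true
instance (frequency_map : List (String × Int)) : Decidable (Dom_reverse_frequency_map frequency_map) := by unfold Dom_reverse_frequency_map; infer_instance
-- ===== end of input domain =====

-- B never sorts a bucket: buckets are pre-created in first-occurrence order of the values,
-- the item list is sorted once globally by key, and keys are distributed in one pass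
-- (objective: faster — one global sort instead of a re-sort after every append).

-- ===== PORT A =====
-- for k, v: if v not in result: result[v] = []; result[v].append(k); result[v].sort()
def pvStepA (result : PySem.Dict Int (List String)) (kv : String × Int) : PySem.Dict Int (List String) :=
  let r1 := if result.contains kv.2 then result else result.insert kv.2 []
  r1.insert kv.2 (PySem.List.sorted (r1.getD kv.2 [] ++ [kv.1]) (fun x => x) false)

def reverse_frequency_map (frequency_map : List (String × Int)) : List (Int × List String) :=
  (frequency_map.foldl pvStepA PySem.Dict.empty).items

-- ===== PORT B =====
-- result = {v: [] for v in frequency_map.values()}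
def pvInitB (frequency_map : List (String × Int)) : PySem.Dict Int (List String) :=
  frequency_map.foldl (fun d kv => d.insert kv.2 []) PySem.Dict.empty

-- result[v].append(k)  (v is always present; modify with default [] is exact here)
def pvStepB (result : PySem.Dict Int (List String)) (kv : String × Int) : PySem.Dict Int (List String) :=
  result.modify kv.2 [] (fun ks => ks ++ [kv.1])

-- for k, v in sorted(frequency_map.items(), key=lambda kv: kv[0]): result[v].append(k)
def reverse_frequency_map_alt (frequency_map : List (String × Int)) : List (Int × List String) :=
  ((PySem.List.sorted frequency_map (fun kv => kv.1) false).foldl pvStepB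
    (pvInitB frequency_map)).items

-- ===== PRECONDITION & SPEC =====
def Spec_reverse_frequency_map (frequency_map : List (String × Int)) (out : List (Int × List String)) : Prop := out = reverse_frequency_map_alt frequency_map
instance (frequency_map : List (String × Int)) (out : List (Int × List String)) : Decidable (Spec_reverse_frequency_map frequency_map out) := by unfold Spec_reverse_frequency_map; infer_instance

-- ===== CLAIM (what is proved, stated in full; the proofs are below) =====
def Claim_equal_reverse_frequency_map : Prop := ∀ (frequency_map : List (String × Int)), Dom_reverse_frequency_map frequency_map → Spec_reverse_frequency_map frequency_map (reverse_frequency_map frequency_map)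

-- ===== LEMMAS AND PROOFS =====

-- the keys with value v, in input order
def pvKeysWith (fm : List (String × Int)) (v : Int) : List String :=
  (fm.filter (fun kv => kv.2 == v)).map (fun kv => kv.1)

-- sorting a bucket once at the end = re-sorting after each append
lemma pv_sorted_append (bs : List String) (k : String) :
    PySem.List.sorted (PySem.List.sorted bs (fun x => x) false ++ [k]) (fun x => x) false
      = PySem.List.sorted (bs ++ [k]) (fun x => x) false := by
  exact PySem.List.sorted_eq_sorted_of_perm _ _ _ (fun a b h => h)
    ((PySem.List.sorted_perm bs (fun x => x) false).append_right [k])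

-- A's dict has the same keys as B's initial bucket dict
lemma pv_keysA (fm : List (String × Int)) :
    (fm.foldl pvStepA PySem.Dict.empty).keys = (pvInitB fm).keys := by
  rw [pvInitB]
  induction fm using List.reverseRecOn with
  | nil => rfl
  | append_singleton fm kv ih =>
    simp only [List.foldl_append, List.foldl_cons, List.foldl_nil]
    set dA := fm.foldl pvStepA PySem.Dict.empty
    set d0 := fm.foldl (fun d kv => d.insert kv.2 ([] : List String)) PySem.Dict.empty
    have hc : dA.contains kv.2 = d0.contains kv.2 := by
      rw [PySem.Dict.contains_eq_decide_mem_keys, PySem.Dict.contains_eq_decide_mem_keys, ih]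
    by_cases h : dA.contains kv.2 = true
    · have h0 : d0.contains kv.2 = true := by rw [← hc]; exact h
      show (pvStepA dA kv).keys = _
      rw [pvStepA]
      simp only [h, if_pos]
      rw [PySem.Dict.keys_insert_of_contains _ _ h, PySem.Dict.keys_insert_of_contains _ _ h0, ih]
    · have h' : dA.contains kv.2 = false := by simpa using h
      have h0 : d0.contains kv.2 = false := by rw [← hc]; exact h'
      show (pvStepA dA kv).keys = _
      rw [pvStepA]
      simp only [h', if_neg, Bool.false_eq_true, not_false_iff]
      rw [PySem.Dict.keys_insert_of_contains _ _
            (by rw [PySem.Dict.contains_insert]; simp),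
          PySem.Dict.keys_insert_of_not_contains _ _ h',
          PySem.Dict.keys_insert_of_not_contains _ _ h0, ih]

-- A's bucket for v is the sorted list of v's keys
lemma pv_getD_A (fm : List (String × Int)) (v : Int) :
    (fm.foldl pvStepA PySem.Dict.empty).getD v []
      = PySem.List.sorted (pvKeysWith fm v) (fun x => x) false := by
  induction fm using List.reverseRecOn with
  | nil => rfl
  | append_singleton fm kv ih =>
    simp only [List.foldl_append, List.foldl_cons, List.foldl_nil]
    set dA := fm.foldl pvStepA PySem.Dict.empty
    show (pvStepA dA kv).getD v [] = _
    by_cases hv : v = kv.2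
    · subst hv
      have hfil : pvKeysWith (fm ++ [kv]) kv.2 = pvKeysWith fm kv.2 ++ [kv.1] := by
        simp [pvKeysWith, List.filter_append]
      rw [hfil, pvStepA]
      by_cases h : dA.contains kv.2 = true
      · simp only [h, if_pos]
        rw [PySem.Dict.getD_insert, ih, if_pos rfl, pv_sorted_append]
      · have h' : dA.contains kv.2 = false := by simpa using h
        have hnil : pvKeysWith fm kv.2 = [] := by
          have := ih.symm
          rw [PySem.Dict.getD_of_not_contains dA [] h'] at this
          exact (PySem.List.sorted_eq_nil_iff _ _ _).mp this
        simp only [h', if_neg, Bool.false_eq_true, not_false_iff]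
        rw [PySem.Dict.getD_insert, if_pos rfl, PySem.Dict.getD_insert, if_pos rfl, hnil]
    · have hne : (kv.2 == v) = false := by simpa using fun h => hv h.symm
      have hfil : pvKeysWith (fm ++ [kv]) v = pvKeysWith fm v := by
        simp [pvKeysWith, List.filter_append, hne]
      rw [hfil, pvStepA]
      by_cases h : dA.contains kv.2 = true
      · simp only [h, if_pos]
        rw [PySem.Dict.getD_insert, if_neg hv, ih]
      · have h' : dA.contains kv.2 = false := by simpa using h
        simp only [h', if_neg, Bool.false_eq_true, not_false_iff]
        rw [PySem.Dict.getD_insert, if_neg hv, PySem.Dict.getD_insert, if_neg hv, ih]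

-- B's distribution pass never creates a key already present
lemma pv_keysB_foldl (l : List (String × Int)) (d : PySem.Dict Int (List String))
    (h : ∀ kv ∈ l, d.contains kv.2 = true) : (l.foldl pvStepB d).keys = d.keys := by
  induction l generalizing d with
  | nil => rfl
  | cons kv l ih =>
    simp only [List.foldl_cons]
    rw [ih _ (fun kv' hkv' => by
          rw [pvStepB, PySem.Dict.contains_modify, h kv' (List.mem_cons_of_mem _ hkv')]
          simp)]
    rw [pvStepB, PySem.Dict.keys_modify,
      PySem.Dict.keys_insert_of_contains _ _ (h kv (List.mem_cons_self))]

-- B's distribution pass appends each key to its bucket in traversal order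
lemma pv_getD_B_foldl (l : List (String × Int)) (d : PySem.Dict Int (List String)) (v : Int) :
    (l.foldl pvStepB d).getD v [] = d.getD v [] ++ pvKeysWith l v := by
  induction l generalizing d with
  | nil => simp [pvKeysWith]
  | cons kv l ih =>
    simp only [List.foldl_cons]
    rw [ih]
    by_cases hv : v = kv.2
    · subst hv
      rw [pvStepB, PySem.Dict.getD_modify]
      simp [pvKeysWith]
    · rw [pvStepB, PySem.Dict.getD_modify, if_neg hv]
      have : (kv.2 == v) = false := by simpa using fun h => hv h.symm
      simp [pvKeysWith, this]

-- the initial dict maps every value to []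
lemma pv_getD_init_aux (l : List (String × Int)) (d : PySem.Dict Int (List String))
    (h : ∀ v, d.getD v [] = []) :
    ∀ v, (l.foldl (fun d kv => d.insert kv.2 []) d).getD v [] = [] := by
  induction l generalizing d with
  | nil => exact h
  | cons kv l ih =>
    simp only [List.foldl_cons]
    exact ih _ (fun v => by rw [PySem.Dict.getD_insert]; split <;> simp [h])

lemma pv_getD_init (fm : List (String × Int)) (v : Int) : (pvInitB fm).getD v [] = [] :=
  pv_getD_init_aux fm PySem.Dict.empty (fun v => PySem.Dict.getD_empty v []) v

-- the initial dict contains the value of every item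
lemma pv_contains_init (fm : List (String × Int)) (kv : String × Int) (h : kv ∈ fm) :
    (pvInitB fm).contains kv.2 = true := by
  rw [pvInitB]
  induction fm using List.reverseRecOn with
  | nil => cases h
  | append_singleton fm kv' ih =>
    simp only [List.foldl_append, List.foldl_cons, List.foldl_nil, PySem.Dict.contains_insert]
    rcases List.mem_append.mp h with h' | h'
    · rw [ih h']; simp
    · simp [List.mem_singleton.mp h']

-- filtering the globally key-sorted list gives each bucket already sorted
lemma pv_bucket_bridge (fm : List (String × Int)) (v : Int) :
    PySem.List.sorted (pvKeysWith fm v) (fun x => x) false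
      = pvKeysWith (PySem.List.sorted fm (fun kv => kv.1) false) v := by
  apply PySem.List.sorted_id_eq_of_perm_of_pairwise
  · exact ((PySem.List.sorted_perm fm (fun kv => kv.1) false).filter _).map _
  · exact List.pairwise_map.mpr ((PySem.List.sorted_pairwise fm (fun kv => kv.1)).filter _)

-- ===== VERDICT (by name: the statement is the Claim_ definition above) =====
theorem reverse_frequency_map_spec : Claim_equal_reverse_frequency_map := by
  intro fm _
  show reverse_frequency_map fm = reverse_frequency_map_alt fm
  have hmem : ∀ kv ∈ PySem.List.sorted fm (fun kv => kv.1) false,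
      (pvInitB fm).contains kv.2 = true := fun kv hkv =>
    pv_contains_init fm kv ((PySem.List.mem_sorted _ _ _ _).mp hkv)
  have hkeysB : ((PySem.List.sorted fm (fun kv => kv.1) false).foldl pvStepB
      (pvInitB fm)).keys = (pvInitB fm).keys := pv_keysB_foldl _ _ hmem
  have hnd0 : (pvInitB fm).keys.Nodup :=
    PySem.Dict.nodup_keys_foldl_insert_key fm (fun kv => kv.2) (fun _ _ => []) _
      PySem.Dict.nodup_keys_empty
  have hndA : (fm.foldl pvStepA PySem.Dict.empty).keys.Nodup := by rw [pv_keysA]; exact hnd0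
  have hndB := hkeysB ▸ hnd0
  rw [reverse_frequency_map, reverse_frequency_map_alt,
    PySem.Dict.items_eq_map_keys _ hndA ([] : List String),
    PySem.Dict.items_eq_map_keys _ hndB ([] : List String),
    pv_keysA, hkeysB]
  refine List.map_congr_left (fun k _ => ?_)
  rw [pv_getD_A, pv_getD_B_foldl, pv_getD_init, pv_bucket_bridge]
  simp
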